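-- pv_equiv track=rewrite | github.com/zeyongj/LeetCode | 3625-count-number-of-trapezoids-ii/3625-count-number-of-trapezoids-ii.py | _count
-- ===== SOURCE A (Python) =====
-- def _count(mp):
--     ans = 0
--     for inner in mp.values():
--         total = sum(inner.values())
--         rem = total
--         for val in inner.values():
--             rem -= val
--             ans += val * rem
--     return ans
-- ===== SOURCE B (Python) =====
-- def _pairsum(vals):
--     total = sum(vals)
--     sq = sum(v * v for v in vals)
--     return (total * total - sq) // 2
--
-- def _count(mp):
--     return sum(_pairsum(list(inner.values())) for inner in mp.values())
-- ===== Notes on version B (the rewrite author's own statement) =====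
-- stated objective: simpler
-- what changed: Replaces the running-remainder inner accumulation (rem -= val; ans += val*rem) with a helper computing the closed form (total^2 - sum of squares) // 2 per group, summed over groups with a generator.
import Mathlib
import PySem

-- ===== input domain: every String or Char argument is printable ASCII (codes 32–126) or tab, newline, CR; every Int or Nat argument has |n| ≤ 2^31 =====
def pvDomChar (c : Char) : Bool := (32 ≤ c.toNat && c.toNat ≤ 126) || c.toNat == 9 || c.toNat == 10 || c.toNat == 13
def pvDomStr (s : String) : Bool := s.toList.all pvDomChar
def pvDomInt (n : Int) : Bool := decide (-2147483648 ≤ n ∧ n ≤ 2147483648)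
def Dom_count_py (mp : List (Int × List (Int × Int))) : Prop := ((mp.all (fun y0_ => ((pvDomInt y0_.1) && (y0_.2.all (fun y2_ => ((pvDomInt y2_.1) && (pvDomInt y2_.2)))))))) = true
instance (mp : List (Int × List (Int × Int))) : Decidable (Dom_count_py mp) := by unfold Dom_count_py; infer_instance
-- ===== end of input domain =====

-- B replaces A's running-remainder inner loop with a per-group helper computing (total² − Σv²) // 2, summed over groups (simpler, same cost).


-- ===== PORT A =====
-- 'ans = 0; for inner in mp.values(): total = sum(inner.values()); rem = total; for val: rem -= val; ans += val*rem'
def count_py (mp : List (Int × List (Int × Int))) : Int :=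
  (PySem.Dict.ofList mp).values.foldl (fun ans inner =>
    let vals := (PySem.Dict.ofList inner).values
    let total := vals.foldl (· + ·) 0
    (vals.foldl (fun (p : Int × Int) val => (p.1 + val * (p.2 - val), p.2 - val)) (ans, total)).1) 0

-- ===== PORT B =====
-- helper '_pairsum(vals): total = sum(vals); sq = sum(v*v for v in vals); return (total*total - sq) // 2'
def pairsum (vals : List Int) : Int :=
  let total := vals.sum
  let sq := (vals.map (fun v => v * v)).sum
  PySem.Int.floordiv (total * total - sq) 2

-- 'return sum(_pairsum(list(inner.values())) for inner in mp.values())'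
def count_py_alt (mp : List (Int × List (Int × Int))) : Int :=
  ((PySem.Dict.ofList mp).values.map (fun inner => pairsum (PySem.Dict.ofList inner).values)).sum

-- ===== PRECONDITION & SPEC =====
def Spec_count_py (mp : List (Int × List (Int × Int))) (out : Int) : Prop := out = count_py_alt mp
instance (mp : List (Int × List (Int × Int))) (out : Int) : Decidable (Spec_count_py mp out) := by unfold Spec_count_py; infer_instance

-- ===== CLAIM (what is proved, stated in full; the proofs are below) =====
def Claim_equal_count_py : Prop := ∀ (mp : List (Int × List (Int × Int))), Dom_count_py mp → Spec_count_py mp (count_py mp)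

-- ===== LEMMAS AND PROOFS =====

theorem pv_foldl_add_shift (l : List Int) (c : Int) :
    l.foldl (· + ·) c = c + l.sum := by
  induction l generalizing c with
  | nil => simp
  | cons v t ih => simp only [List.foldl_cons, List.sum_cons]; rw [ih]; ring

-- A's inner loop, doubled, equals the closed polynomial in the sum and the sum of squares.
theorem pv_inner_loop (l : List Int) (a r : Int) :
    2 * (l.foldl (fun (p : Int × Int) val => (p.1 + val * (p.2 - val), p.2 - val)) (a, r)).1
      = 2 * a + 2 * r * l.sum - l.sum * l.sum - (l.map (fun v => v * v)).sum := by
  induction l generalizing a r with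
  | nil => simp
  | cons v t ih =>
      simp only [List.foldl_cons, List.map_cons, List.sum_cons]
      rw [ih]
      ring

-- A's inner loop equals 'ans + pairsum vals'.
theorem pv_group (l : List Int) (a : Int) :
    (l.foldl (fun (p : Int × Int) val => (p.1 + val * (p.2 - val), p.2 - val))
        (a, l.foldl (· + ·) 0)).1 = a + pairsum l := by
  rw [pv_foldl_add_shift l 0, zero_add]
  have h := pv_inner_loop l a l.sum
  unfold pairsum
  rw [PySem.Int.floordiv_eq_ediv_of_pos (by omega)]
  have h2 : 2 * ((l.foldl (fun (p : Int × Int) val => (p.1 + val * (p.2 - val), p.2 - val))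
        (a, l.sum)).1 - a) = l.sum * l.sum - (l.map (fun v => v * v)).sum := by
    linarith
  generalize (l.sum : Int) * l.sum = P at h2 ⊢
  omega

-- A's outer fold over groups equals the sum of per-group pairsums.
theorem pv_outer (L : List (List (Int × Int))) (a : Int) :
    L.foldl (fun ans inner =>
        let vals := (PySem.Dict.ofList inner).values
        let total := vals.foldl (· + ·) 0
        (vals.foldl (fun (p : Int × Int) val => (p.1 + val * (p.2 - val), p.2 - val)) (ans, total)).1) a
      = a + (L.map (fun inner => pairsum (PySem.Dict.ofList inner).values)).sum := by
  induction L generalizing a with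
  | nil => simp
  | cons inner t ih =>
      simp only [List.foldl_cons, List.map_cons, List.sum_cons]
      rw [pv_group, ih]
      ring

-- ===== VERDICT (by name: the statement is the Claim_ definition above) =====
theorem count_py_spec : Claim_equal_count_py := by
  intro mp _
  show count_py mp = count_py_alt mp
  unfold count_py count_py_alt
  rw [pv_outer]
  simp
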